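-- pv_equiv track=rewrite | github.com/infiloop2/uk_cgt_calculator | utils.py | removeCommasWithinQuotes
-- ===== SOURCE A (Python) =====
-- def removeCommasWithinQuotes(line):
--     # Removes commas from a line only when they appear within " ... "
--     # This is to preprocess a line before splitting it by comma (csv)
--     insideQuotes = False
--     formatted_string = ''
--     for c in line:
--         if c == '"':
--             insideQuotes = not insideQuotes
--         elif c == ',':
--             if not insideQuotes:
--                 formatted_string += c
--         else:
--             formatted_string += c
--
--     return formatted_string
-- ===== SOURCE B (Python) =====
-- def removeCommasWithinQuotes(line):
--     # Splitting on '"' makes segments alternate outside/inside quotes: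
--     # strip commas from the odd (inside) segments and concatenate.
--     return ''.join(seg.replace(',', '') if i % 2 else seg
--                    for i, seg in enumerate(line.split('"')))
-- ===== Notes on version B (the rewrite author's own statement) =====
-- stated objective: idiomatic
-- what changed: Replaces the character-by-character insideQuotes toggle loop by splitting the line on the double-quote character (segments alternate outside/inside quotes), stripping commas from the odd-indexed segments and joining them; same O(n) work but done by C-level str methods instead of a per-character Python loop with string concatenation.
import Mathlib
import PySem

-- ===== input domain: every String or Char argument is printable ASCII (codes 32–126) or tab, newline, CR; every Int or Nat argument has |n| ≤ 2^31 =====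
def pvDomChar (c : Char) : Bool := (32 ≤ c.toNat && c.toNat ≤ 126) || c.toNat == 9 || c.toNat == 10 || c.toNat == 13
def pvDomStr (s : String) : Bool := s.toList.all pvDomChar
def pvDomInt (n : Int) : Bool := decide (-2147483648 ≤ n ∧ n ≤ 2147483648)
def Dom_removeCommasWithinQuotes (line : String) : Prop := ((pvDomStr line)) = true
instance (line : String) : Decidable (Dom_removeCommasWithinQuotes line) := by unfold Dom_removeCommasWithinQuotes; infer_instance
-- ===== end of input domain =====

-- B replaces A's char-by-char toggle loop by split-on-quote / strip-commas-in-odd-segments / join (more idiomatic; a timing run measured it faster by a constant factor).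

-- ===== PORT A =====
-- the for-loop over the characters, state = (insideQuotes, formatted_string)
def pvLoopA : List Char → Bool → List Char → List Char
  | [], _, acc => acc
  | c :: cs, insideQuotes, acc =>
    if c = '"' then pvLoopA cs (!insideQuotes) acc
    else if c = ',' then
      if !insideQuotes then pvLoopA cs insideQuotes (acc ++ [c])
      else pvLoopA cs insideQuotes acc
    else pvLoopA cs insideQuotes (acc ++ [c])

def removeCommasWithinQuotes (line : String) : String :=
  String.ofList (pvLoopA line.toList false [])

-- ===== PORT B =====
-- line.split('"') (sep is a nonempty literal, so split? is always some)
def removeCommasWithinQuotes_alt (line : String) : String :=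
  PySem.Str.join ""
    ((PySem.List.enumerate ((PySem.Str.split? line "\"").getD [])).map
      (fun p => if p.1 % 2 = 1 then PySem.Str.replace p.2 "," "" else p.2))

-- ===== PRECONDITION & SPEC =====
def Spec_removeCommasWithinQuotes (line : String) (out : String) : Prop := out = removeCommasWithinQuotes_alt line
instance (line : String) (out : String) : Decidable (Spec_removeCommasWithinQuotes line out) := by unfold Spec_removeCommasWithinQuotes; infer_instance

-- ===== CLAIM (what is proved, stated in full; the proofs are below) =====
def Claim_equal_removeCommasWithinQuotes : Prop := ∀ (line : String), Dom_removeCommasWithinQuotes line → Spec_removeCommasWithinQuotes line (removeCommasWithinQuotes line)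

-- ===== LEMMAS AND PROOFS =====

-- the quote-split of a character list (head variant of Python's split('"'))
def splitQ : List Char → List (List Char)
  | [] => [[]]
  | c :: cs => if c = '"' then [] :: splitQ cs else (splitQ cs).modifyHead (c :: ·)

-- alternate: keep even segments, strip commas from odd ones, concatenate
def mixQ : Bool → List (List Char) → List Char
  | _, [] => []
  | b, s :: ss => (if b then s.filter (· ≠ ',') else s) ++ mixQ (!b) ss

theorem splitQ_ne_nil (l : List Char) : splitQ l ≠ [] := by
  induction l with
  | nil => simp [splitQ]
  | cons c cs ih =>
    simp only [splitQ]
    split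
    · simp
    · cases h : splitQ cs with
      | nil => exact absurd h ih
      | cons s ss => simp

theorem splitOn_go_spec (fuel : Nat) :
    ∀ (l cur : List Char) (accs : List (List Char)), l.length < fuel →
      PySem.Chars.splitOn.go ['"'] fuel l cur accs.reverse =
        accs ++ (splitQ l).modifyHead (cur.reverse ++ ·) := by
  induction fuel with
  | zero => intro l cur accs h; omega
  | succ fuel ih =>
    intro l cur accs h
    cases l with
    | nil =>
      simp [PySem.Chars.splitOn.go, splitQ]
    | cons c rest =>
      by_cases hc : c = '"'
      · subst hc
        have : PySem.Chars.splitOn.go ['"'] (fuel+1) ('"' :: rest) cur accs.reverse =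
            PySem.Chars.splitOn.go ['"'] fuel rest [] (cur.reverse :: accs.reverse) := by
          simp [PySem.Chars.splitOn.go, List.isPrefixOf]
        rw [this]
        have h2 := ih rest [] (accs ++ [cur.reverse]) (by simpa using Nat.lt_of_succ_lt_succ h)
        simp only [List.reverse_append, List.reverse_cons, List.reverse_nil, List.nil_append,
          List.singleton_append] at h2
        rw [h2]
        cases hs : splitQ rest with
        | nil => exact absurd hs (splitQ_ne_nil rest)
        | cons s ss => simp [splitQ, hs]
      · have : PySem.Chars.splitOn.go ['"'] (fuel+1) (c :: rest) cur accs.reverse =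
            PySem.Chars.splitOn.go ['"'] fuel rest (c :: cur) accs.reverse := by
          have hp : (['"'].isPrefixOf (c :: rest)) = false := by
            simp [List.isPrefixOf]
            exact fun h => absurd h.symm hc
          simp [PySem.Chars.splitOn.go, hp]
        rw [this, ih rest (c :: cur) accs (by simpa using Nat.lt_of_succ_lt_succ h)]
        cases hs : splitQ rest with
        | nil => exact absurd hs (splitQ_ne_nil rest)
        | cons s ss => simp [splitQ, hc, hs]

theorem splitOn_eq_splitQ (l : List Char) :
    PySem.Chars.splitOn l ['"'] = splitQ l := by
  have h := splitOn_go_spec (l.length + 1) l [] [] (by omega)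
  simp only [List.reverse_nil, List.nil_append] at h
  rw [PySem.Chars.splitOn, h]
  cases hs : splitQ l with
  | nil => exact absurd hs (splitQ_ne_nil l)
  | cons s ss => simp

theorem replace_go_spec (fuel : Nat) :
    ∀ (l acc : List Char), l.length ≤ fuel →
      PySem.Chars.replace.go [','] [] fuel l acc = acc.reverse ++ l.filter (· ≠ ',') := by
  induction fuel with
  | zero =>
    intro l acc h
    have : l = [] := by cases l <;> simp_all
    subst this; simp [PySem.Chars.replace.go]
  | succ fuel ih =>
    intro l acc h
    cases l with
    | nil => simp [PySem.Chars.replace.go]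
    | cons c rest =>
      by_cases hc : c = ','
      · subst hc
        have : PySem.Chars.replace.go [','] [] (fuel+1) (',' :: rest) acc =
            PySem.Chars.replace.go [','] [] fuel rest acc := by
          simp [PySem.Chars.replace.go, List.isPrefixOf]
        rw [this, ih rest acc (by simpa using Nat.le_of_succ_le_succ h)]
        simp
      · have : PySem.Chars.replace.go [','] [] (fuel+1) (c :: rest) acc =
            PySem.Chars.replace.go [','] [] fuel rest (c :: acc) := by
          have hp : ([','].isPrefixOf (c :: rest)) = false := by
            simp [List.isPrefixOf]
            exact fun h => absurd h.symm hc
          simp [PySem.Chars.replace.go, hp]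
        rw [this, ih rest (c :: acc) (by simpa using Nat.le_of_succ_le_succ h)]
        simp [hc]

theorem replace_comma_eq_filter (s : List Char) :
    PySem.Chars.replace s [','] [] = s.filter (· ≠ ',') := by
  simpa [PySem.Chars.replace] using replace_go_spec s.length s [] le_rfl

theorem loopA_eq_mixQ (cs : List Char) :
    ∀ (b : Bool) (acc : List Char), pvLoopA cs b acc = acc ++ mixQ b (splitQ cs) := by
  induction cs with
  | nil => intro b acc; cases b <;> simp [pvLoopA, splitQ, mixQ]
  | cons c rest ih =>
    intro b acc
    by_cases hq : c = '"'
    · subst hq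
      simp only [pvLoopA, splitQ, ih]
      cases b <;> simp [mixQ]
    · cases hs : splitQ rest with
      | nil => exact absurd hs (splitQ_ne_nil rest)
      | cons s ss =>
        by_cases hcm : c = ','
        · subst hcm
          cases b with
          | false =>
            simp only [pvLoopA, if_neg hq, Bool.not_false, ih, hs]
            simp [splitQ, hq, hs, mixQ]
          | true =>
            simp only [pvLoopA, if_neg hq, Bool.not_true, Bool.false_eq_true, ih, hs]
            simp [splitQ, hq, hs, mixQ]
        · simp only [pvLoopA, if_neg hq, if_neg hcm, ih, hs]
          cases b <;> simp [splitQ, hq, hs, mixQ, hcm]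

theorem join_nil_cons (x : List Char) (xs : List (List Char)) :
    PySem.Chars.join [] (x :: xs) = x ++ PySem.Chars.join [] xs := by
  cases xs <;> simp [PySem.Chars.join, List.intercalate]

theorem enumerate_map {α β : Type} (g : α → β) (xs : List α) :
    ∀ (i : Int), PySem.List.enumerate (xs.map g) i =
      (PySem.List.enumerate xs i).map (fun p => (p.1, g p.2)) := by
  induction xs with
  | nil => intro i; simp [PySem.List.enumerate]
  | cons x rest ih => intro i; simp [PySem.List.enumerate, ih]

theorem join_enumerate_eq_mixQ (L : List (List Char)) :
    ∀ (i : Int), 0 ≤ i →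
      PySem.Chars.join []
        ((PySem.List.enumerate L i).map
          (fun p => if p.1 % 2 = 1 then p.2.filter (· ≠ ',') else p.2)) =
      mixQ (decide (i % 2 = 1)) L := by
  induction L with
  | nil => intro i _; simp [PySem.List.enumerate, PySem.Chars.join, List.intercalate, mixQ]
  | cons s ss ih =>
    intro i hi
    simp only [PySem.List.enumerate, List.map_cons, join_nil_cons, ih (i+1) (by omega)]
    have hpar : ((i + 1) % 2 = 1) ↔ ¬ (i % 2 = 1) := by omega
    by_cases h : i % 2 = 1
    · simp [mixQ, h, hpar.not_left.mpr (by simpa using h)]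
    · have : (i + 1) % 2 = 1 := hpar.mpr h
      simp [mixQ, h, this]

-- ===== VERDICT (by name: the statement is the Claim_ definition above) =====
theorem removeCommasWithinQuotes_spec : Claim_equal_removeCommasWithinQuotes := by
  intro line _
  unfold Spec_removeCommasWithinQuotes removeCommasWithinQuotes removeCommasWithinQuotes_alt
  rw [loopA_eq_mixQ line.toList false []]
  simp only [List.nil_append]
  have hsplit : (PySem.Str.split? line "\"").getD [] =
      (splitQ line.toList).map String.ofList := by
    simp [PySem.Str.split?, PySem.Chars.split?, splitOn_eq_splitQ]
  rw [hsplit]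
  rw [enumerate_map String.ofList (splitQ line.toList) 0]
  have hmap :
      (((PySem.List.enumerate (splitQ line.toList) 0).map
          (fun p => (p.1, String.ofList p.2))).map
        (fun p => if p.1 % 2 = 1 then PySem.Str.replace p.2 "," "" else p.2)) =
      ((PySem.List.enumerate (splitQ line.toList) 0).map
        (fun p => if p.1 % 2 = 1 then String.ofList (p.2.filter (· ≠ ',')) else String.ofList p.2)) := by
    rw [List.map_map]
    apply List.map_congr_left
    intro p _
    by_cases h : p.1 % 2 = 1
    · simp only [Function.comp, h, if_pos]
      apply String.toList_injective
      simp [PySem.Str.toList_replace, replace_comma_eq_filter]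
    · simp [Function.comp, h]
  rw [hmap]
  rw [PySem.Str.join]
  have hlist : List.map String.toList
      ((PySem.List.enumerate (splitQ line.toList)).map
        (fun p => if p.1 % 2 = 1 then String.ofList (p.2.filter (· ≠ ',')) else String.ofList p.2)) =
      (PySem.List.enumerate (splitQ line.toList)).map
        (fun p => if p.1 % 2 = 1 then p.2.filter (· ≠ ',') else p.2) := by
    rw [List.map_map]
    apply List.map_congr_left
    intro p _
    by_cases h : p.1 % 2 = 1 <;> simp [Function.comp, h]
  rw [hlist]
  have hmix := join_enumerate_eq_mixQ (splitQ line.toList) 0 le_rfl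
  rw [show String.toList "" = ([] : List Char) from rfl]
  simp only [ne_eq]
  rw [hmix]
  norm_num
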